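-- pv_equiv track=rewrite | github.com/langprocgroup/infoloc_morph | infoloc_morphology.py | thing_in_context
-- ===== SOURCE A (Python) =====
-- DELIMITER = '#'
--
-- def restorer(xs):
--     if isinstance(xs, str):
--         return "".join
--     else:
--         return tuple
--
-- def thing_in_context(xs):
--     restore = restorer(xs)
--     if xs[0] is DELIMITER:
--         context = [DELIMITER]
--         xs = xs[1:]
--     else:
--         context = []
--     for x in xs:
--         yield restore(context), x
--         context.append(x)
-- ===== SOURCE B (Python) =====
-- DELIMITER = '#'
--
-- def restorer(xs):
--     if isinstance(xs, str):
--         return "".join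
--     else:
--         return tuple
--
-- def thing_in_context(xs):
--     restore = restorer(xs)
--     offset = 1 if xs[0] is DELIMITER else 0
--     for i in range(offset, len(xs)):
--         yield restore(xs[:i]), xs[i]
-- ===== Notes on version B (the rewrite author's own statement) =====
-- stated objective: simpler
-- what changed: Drops the mutable growing context accumulator: B computes a start offset from the leading delimiter and yields restore(xs[:i]), xs[i] directly from prefix slices over an index range.
import Mathlib
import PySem

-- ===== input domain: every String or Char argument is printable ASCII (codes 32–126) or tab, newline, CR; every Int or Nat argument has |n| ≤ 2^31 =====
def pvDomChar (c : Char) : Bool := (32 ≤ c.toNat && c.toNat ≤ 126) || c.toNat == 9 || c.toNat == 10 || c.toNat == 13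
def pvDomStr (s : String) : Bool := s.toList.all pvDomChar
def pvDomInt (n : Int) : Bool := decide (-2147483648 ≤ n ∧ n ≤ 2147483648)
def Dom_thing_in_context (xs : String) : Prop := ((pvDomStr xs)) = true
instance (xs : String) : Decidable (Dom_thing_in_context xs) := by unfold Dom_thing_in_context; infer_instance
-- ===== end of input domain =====

-- B replaces A's mutable growing context accumulator by direct prefix slices xs[:i]
-- over an index range starting after an optional leading delimiter (simpler decomposition).

-- ===== PORT A =====
-- A's for-loop: yield (restore(context), x) then append x to context.
def thingLoopA (context : List Char) : List Char → List (String × String)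
  | [] => []
  | x :: rest => (String.ofList context, String.ofList [x]) :: thingLoopA (context ++ [x]) rest

def thing_in_context (xs : String) : List (String × String) :=
  match xs.toList with
  | [] => []  -- unreachable under Pre_: Python A raises IndexError on xs[0]
  | c :: rest =>
    if c = '#' then thingLoopA ['#'] rest
    else thingLoopA [] (c :: rest)

-- ===== PORT B =====
def thing_in_context_alt (xs : String) : List (String × String) :=
  match xs.toList with
  | [] => []  -- unreachable under Pre_: Python B raises IndexError on xs[0]
  | c :: rest =>
    let l := c :: rest
    let offset := if c = '#' then 1 else 0
    ((List.range l.length).drop offset).map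
      (fun i => (String.ofList (l.take i), String.ofList ((l.drop i).take 1)))
      -- xs[:i] = l.take i; xs[i] with i in range = (l.drop i).take 1

-- ===== PRECONDITION & SPEC =====
-- Pre_ excludes only the empty string, on which Python A raises IndexError at xs[0].
def Pre_thing_in_context (xs : String) : Prop := xs ≠ ""
instance (xs : String) : Decidable (Pre_thing_in_context xs) := by unfold Pre_thing_in_context; infer_instance
def pvWitness_thing_in_context : String := "#ab"

def Spec_thing_in_context (xs : String) (out : List (String × String)) : Prop := out = thing_in_context_alt xs
instance (xs : String) (out : List (String × String)) : Decidable (Spec_thing_in_context xs out) := by unfold Spec_thing_in_context; infer_instance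

-- ===== CLAIM (what is proved, stated in full; the proofs are below) =====
def Claim_equal_thing_in_context : Prop := ∀ (xs : String), Dom_thing_in_context xs → Pre_thing_in_context xs → Spec_thing_in_context xs (thing_in_context xs)

-- ===== LEMMAS AND PROOFS =====

-- A's loop, characterised as a map over indices of the remaining list.
theorem thingLoopA_eq_map (body : List Char) : ∀ (ctx : List Char),
    thingLoopA ctx body =
      (List.range body.length).map
        (fun i => (String.ofList (ctx ++ body.take i), String.ofList ((body.drop i).take 1))) := by
  induction body with
  | nil => intro ctx; simp [thingLoopA]
  | cons x rest ih =>
      intro ctx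
      rw [thingLoopA, ih (ctx ++ [x]), List.length_cons, List.range_succ_eq_map,
        List.map_cons, List.map_map]
      refine congrArg₂ _ (by simp) ?_
      apply List.map_congr_left
      intro i _
      simp [Function.comp, List.take_succ_cons, List.drop_succ_cons, List.append_assoc]

theorem thing_in_context_spec : Claim_equal_thing_in_context := by
  intro xs _ _
  unfold Spec_thing_in_context thing_in_context thing_in_context_alt
  cases h : xs.toList with
  | nil => rfl
  | cons c rest =>
      by_cases hc : c = '#'
      · subst hc
        simp [thingLoopA_eq_map, List.range_succ_eq_map, Function.comp,
          List.take_succ_cons, List.drop_succ_cons]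
      · simp [if_neg hc, thingLoopA_eq_map]
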